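-- pv_equiv track=rewrite | github.com/Sami-Altayyar/PLOGA | assembler.py | bulidgraph
-- ===== SOURCE A (Python) =====
-- def bulidgraph(reads, h, mink):
--     graph = dict()
--     r = 0
--     starts = set()
--     notstarts = set()
--     for read in reads:
--         graph[r] = []
--         for x in range(1, len(read)):
--             if read[x:x + mink] in h:
--                 l = h[read[x:x + mink]]
--                 for rd in l:
--                     if read[x:] == reads[rd][:len(read[x:])]:
--                         graph[r].append((rd, x))
--                         notstarts.add(rd)
--                         if rd in starts:
--                             starts.remove(rd)
--                         if not r in notstarts:
--                             starts.add(r)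
--         #        if len (graph[r]) == 0 :
--         #            #The read is not connected with any other read
--         #            notconnected.append (r)
--         #            del graph[r]
--
--         r += 1
--     return graph, starts
-- ===== SOURCE B (Python) =====
-- def bulidgraph(reads, h, mink):
--     # k-mer JOIN instead of per-position hash lookups: index every suffix position
--     # of every read by its k-mer once, join that index against h's entries
--     # key-centrically into verified edge records, sort the records back into scan
--     # order, then derive the adjacency lists and the source set from the sorted
--     # record list in separate post-passes.
--     occ = {}
--     for r, read in enumerate(reads):
--         for x in range(1, len(read)):
--             occ.setdefault(read[x:x + mink], []).append((read[x:], r, x))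
--     records = []
--     for kmer, targets in h.items():
--         for suffix, r, x in occ.get(kmer, []):
--             for i, rd in enumerate(targets):
--                 if reads[rd].startswith(suffix):
--                     records.append((r, x, i, rd))
--     srt = sorted(records)
--     graph = {r: [(rd, x) for rr, x, i, rd in srt if rr == r]
--              for r in range(len(reads))}
--     notstarts = {rd for _, _, _, rd in srt}
--     starts = {r for r, e in graph.items() if e and r not in notstarts}
--     return graph, starts
-- ===== Notes on version B (the rewrite author's own statement) =====
-- stated objective: alternative
-- what changed: B inverts A's position-centric control flow into a key-centric k-mer join: it indexes every suffix position by its k-mer once, joins that index against h's entries into verified edge records, sorts the records back into scan order, and derives the adjacency lists and the source set from the sorted record list in separate post-passes (A interleaves per-position dict lookups with incremental starts/notstarts bookkeeping).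
import Mathlib
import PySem

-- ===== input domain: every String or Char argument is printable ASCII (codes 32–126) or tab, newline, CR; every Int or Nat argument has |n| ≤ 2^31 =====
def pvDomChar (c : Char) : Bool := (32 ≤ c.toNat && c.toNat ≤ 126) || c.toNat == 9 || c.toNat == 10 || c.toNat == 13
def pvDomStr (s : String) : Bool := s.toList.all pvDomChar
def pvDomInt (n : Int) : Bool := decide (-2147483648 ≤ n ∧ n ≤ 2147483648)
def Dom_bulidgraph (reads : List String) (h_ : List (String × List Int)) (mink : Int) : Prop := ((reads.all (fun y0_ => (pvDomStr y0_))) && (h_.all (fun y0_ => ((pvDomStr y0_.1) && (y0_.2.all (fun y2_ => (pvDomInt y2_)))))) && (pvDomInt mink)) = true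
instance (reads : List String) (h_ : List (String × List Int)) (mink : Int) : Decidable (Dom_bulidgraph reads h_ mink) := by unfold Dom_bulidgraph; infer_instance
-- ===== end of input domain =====

-- B replaces A's per-position hash lookups by a k-mer JOIN: a flat position stream joined
-- key-centrically against h's entries into edge records, sorted back into scan order, with
-- the adjacency lists and the source set derived from the sorted records in post-passes.

-- ===== PORT A =====
def bulidgraph (reads : List String) (h_ : List (String × List Int)) (mink : Int) :
    (List (Int × List (Int × Int))) × List Int :=
  let h : PySem.Dict String (List Int) := PySem.Dict.mk h_
  let fin :=
    reads.foldl
      (fun (st : PySem.Dict Int (List (Int × Int)) × Int × PySem.Set Int × PySem.Set Int) read =>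
        let g0 := st.1.insert st.2.1 []
        let inner :=
          (PySem.List.pyRange 1 (PySem.Str.len read) 1).foldl
            (fun (st2 : PySem.Dict Int (List (Int × Int)) × PySem.Set Int × PySem.Set Int) x =>
              if h.contains (PySem.Str.slice read (some x) (some (x + mink))) then
                (h.getD (PySem.Str.slice read (some x) (some (x + mink))) []).foldl
                  (fun st3 rd =>
                    if PySem.Str.slice read (some x) none ==
                        PySem.Str.slice ((PySem.List.pyGet? reads rd).getD "") none
                          (some (PySem.Str.len (PySem.Str.slice read (some x) none))) then
                      let g' := st3.1.modify st.2.1 [] (fun l => l ++ [(rd, x)])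
                      let ns' := PySem.Set.add st3.2.2 rd
                      let s' := if PySem.Set.contains st3.2.1 rd then PySem.Set.discard st3.2.1 rd
                                else st3.2.1
                      let s'' := if !(PySem.Set.contains ns' st.2.1) then PySem.Set.add s' st.2.1
                                 else s'
                      (g', s'', ns')
                    else st3)
                  st2
              else st2)
            (g0, st.2.2.1, st.2.2.2)
        (inner.1, st.2.1 + 1, inner.2.1, inner.2.2))
      (PySem.Dict.empty, 0, PySem.Set.empty, PySem.Set.empty)
  (fin.1.items, fin.2.2.1)

-- ===== PORT B =====
-- Python's tuple comparison in sorted(records) is lexicographic on the four Int components;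
-- it is ported as the lexicographic order on the 4-element key list [r, x, i, rd].
def bulidgraph_alt (reads : List String) (h_ : List (String × List Int)) (mink : Int) :
    (List (Int × List (Int × Int))) × List Int :=
  let occ :=
    (PySem.List.enumerate reads 0).foldl
      (fun (d : PySem.Dict String (List (String × Int × Int))) rp =>
        (PySem.List.pyRange 1 (PySem.Str.len rp.2) 1).foldl
          (fun d2 x =>
            d2.modify (PySem.Str.slice rp.2 (some x) (some (x + mink))) []
              (fun l => l ++ [(PySem.Str.slice rp.2 (some x) none, rp.1, x)]))
          d)
      PySem.Dict.empty
  let records :=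
    ((PySem.Dict.mk h_).items).foldl
      (fun acc e =>
        (occ.getD e.1 []).foldl
          (fun acc2 t =>
            (PySem.List.enumerate e.2 0).foldl
              (fun acc3 p =>
                if PySem.Str.startswith ((PySem.List.pyGet? reads p.2).getD "") t.1 then
                  acc3 ++ [(t.2.1, t.2.2, p.1, p.2)]
                else acc3)
              acc2)
          acc)
      []
  let srt := PySem.List.sorted records (fun t => [t.1, t.2.1, t.2.2.1, t.2.2.2])
  let graph :=
    (PySem.List.pyRange 0 (PySem.List.len reads) 1).foldl
      (fun (d : PySem.Dict Int (List (Int × Int))) r =>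
        d.insert r ((srt.filter (fun t => t.1 == r)).map (fun t => (t.2.2.2, t.2.1))))
      PySem.Dict.empty
  let notstarts := srt.foldl (fun s t => PySem.Set.add s t.2.2.2) PySem.Set.empty
  let starts :=
    graph.items.foldl
      (fun s p =>
        if !p.2.isEmpty && !(PySem.Set.contains notstarts p.1) then PySem.Set.add s p.1 else s)
      PySem.Set.empty
  (graph.items, starts)

-- ===== PRECONDITION & SPEC =====
-- A raises IndexError iff some k-mer read[x:x+mink] of some read is a (first-match visible) key
-- of h whose id list contains an rd outside [-len(reads), len(reads)).  Pre_ excludes exactly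
-- those inputs; it also requires the association list h_ to have distinct keys, which every
-- actual Python dict argument has (a duplicate-key association list is a representation
-- artefact with no Python counterpart).
def Pre_bulidgraph (reads : List String) (h_ : List (String × List Int)) (mink : Int) : Prop :=
  (h_.map Prod.fst).Nodup ∧
  ∀ p ∈ h_,
    (∃ read ∈ reads, ∃ x ∈ PySem.List.pyRange 1 (PySem.Str.len read) 1,
        PySem.Str.slice read (some x) (some (x + mink)) = p.1) →
    ∀ rd ∈ p.2, PySem.Raise.InRange reads.length rd

instance (reads : List String) (h_ : List (String × List Int)) (mink : Int) :
    Decidable (Pre_bulidgraph reads h_ mink) := by unfold Pre_bulidgraph; infer_instance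

def pvWitness_bulidgraph : List String × (List (String × List Int)) × Int :=
  (["ab", "b"], [("b", [1])], 1)

def Spec_bulidgraph (reads : List String) (h_ : List (String × List Int)) (mink : Int)
    (out : (List (Int × List (Int × Int))) × List Int) : Prop := out = bulidgraph_alt reads h_ mink
instance (reads : List String) (h_ : List (String × List Int)) (mink : Int)
    (out : (List (Int × List (Int × Int))) × List Int) : Decidable (Spec_bulidgraph reads h_ mink out) := by
  unfold Spec_bulidgraph; infer_instance

-- ===== CLAIM (what is proved, stated in full; the proofs are below) =====
def Claim_equal_bulidgraph : Prop := ∀ (reads : List String) (h_ : List (String × List Int)) (mink : Int), Dom_bulidgraph reads h_ mink → Pre_bulidgraph reads h_ mink → Spec_bulidgraph reads h_ mink (bulidgraph reads h_ mink)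

-- ===== LEMMAS AND PROOFS =====

def acceptT (reads : List String) (read : String) (x rd : Int) : Bool :=
  PySem.Str.startswith ((PySem.List.pyGet? reads rd).getD "")
    (PySem.Str.slice read (some x) none)

def nsAdds (ns : PySem.Set Int) (rds : List Int) : PySem.Set Int :=
  rds.foldl PySem.Set.add ns

def deriveF (ns : PySem.Set Int) (items : List (Int × List (Int × Int))) : PySem.Set Int :=
  (items.filter (fun p => !p.2.isEmpty && !(PySem.Set.contains ns p.1))).map (·.1)

def candX (reads : List String) (h_ : List (String × List Int)) (mink : Int) (read : String)
    (xs : List Int) : List (Int × Int) :=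
  xs.flatMap (fun x =>
    (((PySem.Dict.mk h_).getD (PySem.Str.slice read (some x) (some (x + mink))) []).filter
        (acceptT reads read x)).map (fun rd => (rd, x)))

def rdsX (reads : List String) (h_ : List (String × List Int)) (mink : Int) (read : String)
    (xs : List Int) : List Int :=
  xs.flatMap (fun x =>
    ((PySem.Dict.mk h_).getD (PySem.Str.slice read (some x) (some (x + mink))) []).filter
      (acceptT reads read x))

def candED (reads : List String) (h_ : List (String × List Int)) (mink : Int) (read : String) :
    List (Int × Int) :=
  candX reads h_ mink read (PySem.List.pyRange 1 (PySem.Str.len read) 1)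

def allRds (reads : List String) (h_ : List (String × List Int)) (mink : Int)
    (rest : List String) : List Int :=
  rest.flatMap (fun read =>
    rdsX reads h_ mink read (PySem.List.pyRange 1 (PySem.Str.len read) 1))

-- dict helpers
theorem dict_get_last (pre : List (Int × List (Int × Int))) (r : Int) (cur : List (Int × Int))
    (hpre : ∀ p ∈ pre, p.1 ≠ r) :
    (PySem.Dict.mk (pre ++ [(r, cur)])).get? r = some cur := by
  have hfind : List.find? (fun p => p.1 == r) pre = none := by
    apply List.find?_eq_none.mpr
    intro p hp
    simpa using hpre p hp
  simp [PySem.Dict.get?, List.find?_append, hfind]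

theorem dict_contains_last (pre : List (Int × List (Int × Int))) (r : Int) (cur : List (Int × Int)) :
    (PySem.Dict.mk (pre ++ [(r, cur)])).contains r = true := by
  simp [PySem.Dict.contains]

theorem dict_insert_fresh (items0 : List (Int × List (Int × Int))) (k : Int) (v : List (Int × Int))
    (h : ∀ p ∈ items0, p.1 ≠ k) :
    (PySem.Dict.mk items0).insert k v = PySem.Dict.mk (items0 ++ [(k, v)]) := by
  have hc : (PySem.Dict.mk items0).contains k = false := by
    simp only [PySem.Dict.contains, List.any_eq_false]
    intro p hp
    simpa using h p hp
  simp [PySem.Dict.insert, hc]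

theorem modify_last (pre : List (Int × List (Int × Int))) (r : Int) (cur : List (Int × Int))
    (e : Int × Int) (hpre : ∀ p ∈ pre, p.1 ≠ r) :
    (PySem.Dict.mk (pre ++ [(r, cur)])).modify r [] (fun l => l ++ [e]) =
      PySem.Dict.mk (pre ++ [(r, cur ++ [e])]) := by
  rw [PySem.Dict.modify, PySem.Dict.getD, dict_get_last pre r cur hpre]
  simp only [Option.getD_some]
  rw [PySem.Dict.insert]
  rw [if_pos (dict_contains_last pre r cur)]
  congr 1
  rw [List.map_append]
  have h1 : ∀ p ∈ pre,
      (if p.1 == r then (r, cur ++ [e]) else p) = id p := by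
    intro p hp
    simp [hpre p hp]
  rw [List.map_congr_left h1, List.map_id]
  simp
theorem contains_add_eq (ns : PySem.Set Int) (rd k : Int) :
    PySem.Set.contains (PySem.Set.add ns rd) k = (PySem.Set.contains ns k || k == rd) := by
  by_cases h : rd ∈ ns <;> by_cases hk : k = rd <;>
    simp [PySem.Set.add, h, hk]

theorem discard_ite (s : PySem.Set Int) (rd : Int) :
    (if PySem.Set.contains s rd then PySem.Set.discard s rd else s)
      = s.filter (fun y => !(y == rd)) := by
  by_cases h : PySem.Set.contains s rd
  · simp only [h, if_true]; rfl
  · simp only [h, Bool.false_eq_true, if_false]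
    rw [Eq.comm, List.filter_eq_self]
    intro a ha
    have hne : a ≠ rd := by
      intro e; subst e; exact h (by simpa using ha)
    simp [hne]

theorem deriveF_add (ns : PySem.Set Int) (rd : Int) (items : List (Int × List (Int × Int))) :
    deriveF (PySem.Set.add ns rd) items = (deriveF ns items).filter (fun y => !(y == rd)) := by
  unfold deriveF
  rw [List.filter_map, List.filter_filter]
  congr 1
  apply List.filter_congr
  intro p _
  simp only [contains_add_eq, Function.comp]
  cases hh : p.2.isEmpty <;> cases h1 : PySem.Set.contains ns p.1 <;>
    by_cases h2 : p.1 = rd <;> simp [h2]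

theorem deriveF_append_one (ns : PySem.Set Int) (pre : List (Int × List (Int × Int)))
    (r : Int) (v : List (Int × Int)) :
    deriveF ns (pre ++ [(r, v)]) =
      deriveF ns pre ++ (if !v.isEmpty && !(PySem.Set.contains ns r) then [r] else []) := by
  unfold deriveF
  rw [List.filter_append, List.map_append]
  congr 1
  by_cases hr : r ∈ ns <;> by_cases hv : v = [] <;> simp [hr, hv]

theorem startsStep (pre : List (Int × List (Int × Int))) (r rd : Int) (cur : List (Int × Int))
    (e : Int × Int) (ns : PySem.Set Int) (hpre : ∀ p ∈ pre, p.1 ≠ r) :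
    (let s := deriveF ns (pre ++ [(r, cur)]);
     let ns' := PySem.Set.add ns rd;
     let s1 := if PySem.Set.contains s rd then PySem.Set.discard s rd else s;
     if !(PySem.Set.contains ns' r) then PySem.Set.add s1 r else s1) =
    deriveF (PySem.Set.add ns rd) (pre ++ [(r, cur ++ [e])]) := by
  have hrP : r ∉ deriveF (PySem.Set.add ns rd) pre := by
    intro hmem
    unfold deriveF at hmem
    rcases List.mem_map.mp hmem with ⟨p, hp, hp1⟩
    exact hpre p (List.mem_of_mem_filter hp) hp1
  simp only [discard_ite, ← deriveF_add]
  by_cases hc : PySem.Set.contains (PySem.Set.add ns rd) r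
  · simp only [hc, Bool.not_true, Bool.false_eq_true, if_false]
    rw [deriveF_append_one, deriveF_append_one, hc]
    simp
  · have hcf : PySem.Set.contains (PySem.Set.add ns rd) r = false := by
      simpa using hc
    simp only [hcf, Bool.not_false, if_true]
    rw [deriveF_append_one, deriveF_append_one, hcf]
    by_cases hcur : cur.isEmpty
    · rw [hcur]
      simp only [Bool.not_true, Bool.false_and, Bool.false_eq_true, if_false, List.append_nil]
      rw [PySem.Set.add_of_not_mem hrP]
      simp
    · have : cur.isEmpty = false := by simpa using hcur
      rw [this]
      simp only [Bool.not_false, Bool.true_and, if_true]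
      rw [PySem.Set.add_of_mem (by simp)]
      simp

theorem pv_take_beq (a b : List Char) :
    (a == List.take a.length b) = PySem.Chars.startswith b a := by
  by_cases hp : a <+: b
  · rw [(PySem.Chars.startswith_iff b a).mpr hp, ← List.prefix_iff_eq_take.mp hp]
    exact beq_self_eq_true a
  · have h2 : PySem.Chars.startswith b a = false := by
      rcases hb : PySem.Chars.startswith b a with _ | _
      · rfl
      · exact absurd ((PySem.Chars.startswith_iff b a).mp hb) hp
    rw [h2, beq_eq_false_iff_ne]
    exact fun h => hp (List.prefix_iff_eq_take.mpr h)

theorem pv_str_beq (s t : String) : (s == t) = (s.toList == t.toList) := by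
  by_cases h : s = t
  · simp [h]
  · have : s.toList ≠ t.toList := fun hh => h (by
      have := congrArg String.ofList hh
      simpa using this)
    simp [h, this]

theorem acceptAB (reads : List String) (read : String) (x rd : Int) :
    (PySem.Str.slice read (some x) none ==
      PySem.Str.slice ((PySem.List.pyGet? reads rd).getD "") none
        (some (PySem.Str.len (PySem.Str.slice read (some x) none)))) =
    acceptT reads read x rd := by
  unfold acceptT
  set p := PySem.Str.slice read (some x) none with hp
  set s := (PySem.List.pyGet? reads rd).getD "" with hs
  rw [pv_str_beq, PySem.Str.startswith]
  have hlen : PySem.Str.len p = (p.toList.length : Int) := by simp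
  rw [hlen]
  have hsl : (PySem.Str.slice s none (some ((p.toList.length : Int)))).toList
      = List.take p.toList.length s.toList := by
    simp [PySem.List.slice_to_natCast]
  rw [hsl, pv_take_beq]

def stepAfn (reads : List String) (read : String) (r x : Int) :
    (PySem.Dict Int (List (Int × Int)) × PySem.Set Int × PySem.Set Int) → Int →
    (PySem.Dict Int (List (Int × Int)) × PySem.Set Int × PySem.Set Int) :=
  fun st3 rd =>
    if PySem.Str.slice read (some x) none ==
        PySem.Str.slice ((PySem.List.pyGet? reads rd).getD "") none
          (some (PySem.Str.len (PySem.Str.slice read (some x) none))) then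
      let g' := st3.1.modify r [] (fun l => l ++ [(rd, x)])
      let ns' := PySem.Set.add st3.2.2 rd
      let s' := if PySem.Set.contains st3.2.1 rd then PySem.Set.discard st3.2.1 rd else st3.2.1
      let s'' := if !(PySem.Set.contains ns' r) then PySem.Set.add s' r else s'
      (g', s'', ns')
    else st3

theorem A_step_true (reads : List String) (read : String) (r x rd : Int)
    (pre : List (Int × List (Int × Int))) (cur : List (Int × Int)) (ns : PySem.Set Int)
    (hacc : acceptT reads read x rd = true) (hpre : ∀ p ∈ pre, p.1 ≠ r) :
    stepAfn reads read r x
      (PySem.Dict.mk (pre ++ [(r, cur)]), deriveF ns (pre ++ [(r, cur)]), ns) rd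
    = (PySem.Dict.mk (pre ++ [(r, cur ++ [(rd, x)])]),
       deriveF (PySem.Set.add ns rd) (pre ++ [(r, cur ++ [(rd, x)])]),
       PySem.Set.add ns rd) := by
  unfold stepAfn
  rw [acceptAB, if_pos hacc]
  simp only []
  rw [modify_last pre r cur (rd, x) hpre]
  have hss := startsStep pre r rd cur (rd, x) ns hpre
  simp only [] at hss
  rw [hss]

theorem A_step_false (reads : List String) (read : String) (r x rd : Int)
    (st : PySem.Dict Int (List (Int × Int)) × PySem.Set Int × PySem.Set Int)
    (hacc : acceptT reads read x rd = false) :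
    stepAfn reads read r x st rd = st := by
  unfold stepAfn
  rw [acceptAB, hacc]
  simp

theorem A_l (reads : List String) (read : String) (r x : Int) :
    ∀ (l : List Int) (pre : List (Int × List (Int × Int))) (cur : List (Int × Int))
      (ns : PySem.Set Int), (∀ p ∈ pre, p.1 ≠ r) →
    l.foldl (stepAfn reads read r x)
      (PySem.Dict.mk (pre ++ [(r, cur)]), deriveF ns (pre ++ [(r, cur)]), ns)
    = (PySem.Dict.mk
         (pre ++ [(r, cur ++ (l.filter (acceptT reads read x)).map (fun rd => (rd, x)))]),
       deriveF (nsAdds ns (l.filter (acceptT reads read x)))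
         (pre ++ [(r, cur ++ (l.filter (acceptT reads read x)).map (fun rd => (rd, x)))]),
       nsAdds ns (l.filter (acceptT reads read x))) := by
  intro l
  induction l with
  | nil => intro pre cur ns hpre; simp [nsAdds]
  | cons rd l ih =>
    intro pre cur ns hpre
    rw [List.foldl_cons]
    by_cases hacc : acceptT reads read x rd = true
    · rw [A_step_true reads read r x rd pre cur ns hacc hpre]
      rw [ih pre (cur ++ [(rd, x)]) (PySem.Set.add ns rd) hpre]
      simp [hacc, nsAdds]
    · have hf : acceptT reads read x rd = false := by simpa using hacc
      rw [A_step_false reads read r x rd _ hf]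
      rw [ih pre cur ns hpre]
      simp [hf]

def stepXfn (reads : List String) (h_ : List (String × List Int)) (mink : Int) (read : String)
    (r : Int) :
    (PySem.Dict Int (List (Int × Int)) × PySem.Set Int × PySem.Set Int) → Int →
    (PySem.Dict Int (List (Int × Int)) × PySem.Set Int × PySem.Set Int) :=
  fun st2 x =>
    if (PySem.Dict.mk h_).contains (PySem.Str.slice read (some x) (some (x + mink))) then
      ((PySem.Dict.mk h_).getD (PySem.Str.slice read (some x) (some (x + mink))) []).foldl
        (stepAfn reads read r x) st2
    else st2

theorem A_x (reads : List String) (h_ : List (String × List Int)) (mink : Int) (read : String)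
    (r : Int) :
    ∀ (xs : List Int) (pre : List (Int × List (Int × Int))) (cur : List (Int × Int))
      (ns : PySem.Set Int), (∀ p ∈ pre, p.1 ≠ r) →
    xs.foldl (stepXfn reads h_ mink read r)
      (PySem.Dict.mk (pre ++ [(r, cur)]), deriveF ns (pre ++ [(r, cur)]), ns)
    = (PySem.Dict.mk (pre ++ [(r, cur ++ candX reads h_ mink read xs)]),
       deriveF (nsAdds ns (rdsX reads h_ mink read xs))
         (pre ++ [(r, cur ++ candX reads h_ mink read xs)]),
       nsAdds ns (rdsX reads h_ mink read xs)) := by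
  intro xs
  induction xs with
  | nil => intro pre cur ns hpre; simp [candX, rdsX, nsAdds]
  | cons x xs ih =>
    intro pre cur ns hpre
    rw [List.foldl_cons]
    by_cases hcont :
        (PySem.Dict.mk h_).contains (PySem.Str.slice read (some x) (some (x + mink))) = true
    · have hstep : stepXfn reads h_ mink read r
          (PySem.Dict.mk (pre ++ [(r, cur)]), deriveF ns (pre ++ [(r, cur)]), ns) x
          = (PySem.Dict.mk (pre ++ [(r, cur ++
               (((PySem.Dict.mk h_).getD (PySem.Str.slice read (some x) (some (x + mink))) []).filter
                   (acceptT reads read x)).map (fun rd => (rd, x)))]),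
             deriveF (nsAdds ns (((PySem.Dict.mk h_).getD
                 (PySem.Str.slice read (some x) (some (x + mink))) []).filter (acceptT reads read x)))
               (pre ++ [(r, cur ++
                 (((PySem.Dict.mk h_).getD (PySem.Str.slice read (some x) (some (x + mink))) []).filter
                     (acceptT reads read x)).map (fun rd => (rd, x)))]),
             nsAdds ns (((PySem.Dict.mk h_).getD
                 (PySem.Str.slice read (some x) (some (x + mink))) []).filter (acceptT reads read x))) := by
        unfold stepXfn
        rw [if_pos hcont]
        exact A_l reads read r x _ pre cur ns hpre
      rw [hstep, ih pre _ _ hpre]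
      simp [candX, rdsX, nsAdds, List.flatMap_cons, List.foldl_append, List.append_assoc]
    · have hcf : (PySem.Dict.mk h_).contains (PySem.Str.slice read (some x) (some (x + mink))) = false :=
        Bool.eq_false_iff.mpr hcont
      have hgetD : (PySem.Dict.mk h_).getD (PySem.Str.slice read (some x) (some (x + mink))) [] = [] := by
        rw [PySem.Dict.getD, (PySem.Dict.get?_eq_none_iff_contains _ _).mpr hcf]
        rfl
      have hstep : stepXfn reads h_ mink read r
          (PySem.Dict.mk (pre ++ [(r, cur)]), deriveF ns (pre ++ [(r, cur)]), ns) x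
          = (PySem.Dict.mk (pre ++ [(r, cur)]), deriveF ns (pre ++ [(r, cur)]), ns) := by
        unfold stepXfn
        rw [if_neg (by simp [hcf])]
      rw [hstep, ih pre cur ns hpre]
      simp [candX, rdsX, List.flatMap_cons, hgetD]

def stepOfn (reads : List String) (h_ : List (String × List Int)) (mink : Int) :
    (PySem.Dict Int (List (Int × Int)) × Int × PySem.Set Int × PySem.Set Int) → String →
    (PySem.Dict Int (List (Int × Int)) × Int × PySem.Set Int × PySem.Set Int) :=
  fun st read =>
    let g0 := st.1.insert st.2.1 []
    let inner :=
      (PySem.List.pyRange 1 (PySem.Str.len read) 1).foldl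
        (stepXfn reads h_ mink read st.2.1) (g0, st.2.2.1, st.2.2.2)
    (inner.1, st.2.1 + 1, inner.2.1, inner.2.2)

theorem deriveF_append_emptyval (ns : PySem.Set Int) (items0 : List (Int × List (Int × Int)))
    (r : Int) : deriveF ns (items0 ++ [(r, [])]) = deriveF ns items0 := by
  rw [deriveF_append_one]
  simp

theorem A_outer (reads : List String) (h_ : List (String × List Int)) (mink : Int) :
    ∀ (rest : List String) (items0 : List (Int × List (Int × Int))) (r0 : Int)
      (ns : PySem.Set Int), (∀ p ∈ items0, p.1 < r0) →
    rest.foldl (stepOfn reads h_ mink) (PySem.Dict.mk items0, r0, deriveF ns items0, ns)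
    = (PySem.Dict.mk (items0 ++ (PySem.List.enumerate rest r0).map
          (fun p => (p.1, candED reads h_ mink p.2))),
       r0 + (rest.length : Int),
       deriveF (nsAdds ns (allRds reads h_ mink rest))
         (items0 ++ (PySem.List.enumerate rest r0).map
           (fun p => (p.1, candED reads h_ mink p.2))),
       nsAdds ns (allRds reads h_ mink rest)) := by
  intro rest
  induction rest with
  | nil => intro items0 r0 ns hlt; simp [allRds, nsAdds, PySem.List.enumerate]
  | cons read rest ih =>
    intro items0 r0 ns hlt
    rw [List.foldl_cons]
    have hne : ∀ p ∈ items0, p.1 ≠ r0 := fun p hp => ne_of_lt (hlt p hp)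
    have hstep : stepOfn reads h_ mink (PySem.Dict.mk items0, r0, deriveF ns items0, ns) read
        = (PySem.Dict.mk (items0 ++ [(r0, candED reads h_ mink read)]),
           r0 + 1,
           deriveF (nsAdds ns (rdsX reads h_ mink read
               (PySem.List.pyRange 1 (PySem.Str.len read) 1)))
             (items0 ++ [(r0, candED reads h_ mink read)]),
           nsAdds ns (rdsX reads h_ mink read
             (PySem.List.pyRange 1 (PySem.Str.len read) 1))) := by
      unfold stepOfn
      simp only []
      rw [dict_insert_fresh items0 r0 [] hne]
      rw [show deriveF ns items0 = deriveF ns (items0 ++ [(r0, [])]) from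
        (deriveF_append_emptyval ns items0 r0).symm]
      rw [A_x reads h_ mink read r0 _ items0 [] ns hne]
      simp [candED]
    rw [hstep]
    have hlt' : ∀ p ∈ items0 ++ [(r0, candED reads h_ mink read)], p.1 < r0 + 1 := by
      intro p hp
      rcases List.mem_append.mp hp with h | h
      · exact lt_trans (hlt p h) (by omega)
      · simp only [List.mem_singleton] at h
        rw [h]
        omega
    rw [ih (items0 ++ [(r0, candED reads h_ mink read)]) (r0 + 1)
      (nsAdds ns (rdsX reads h_ mink read (PySem.List.pyRange 1 (PySem.Str.len read) 1))) hlt']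
    have henum : PySem.List.enumerate (read :: rest) r0
        = (r0, read) :: PySem.List.enumerate rest (r0 + 1) := rfl
    rw [henum]
    simp only [List.map_cons, List.append_assoc, List.singleton_append, List.length_cons]
    refine congrArg₂ Prod.mk rfl (congrArg₂ Prod.mk ?_ (congrArg₂ Prod.mk ?_ ?_))
    · push_cast
      ring
    · congr 1
      simp [allRds, nsAdds, List.flatMap_cons, List.foldl_append]
    · simp [allRds, nsAdds, List.flatMap_cons, List.foldl_append]

theorem B_derive (ns : PySem.Set Int) :
    ∀ (items : List (Int × List (Int × Int))) (s0 : PySem.Set Int),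
    (items.map Prod.fst).Nodup → (∀ p ∈ items, p.1 ∉ s0) →
    items.foldl
      (fun s p =>
        if !p.2.isEmpty && !(PySem.Set.contains ns p.1) then PySem.Set.add s p.1 else s)
      s0
    = s0 ++ deriveF ns items := by
  intro items
  induction items with
  | nil => intro s0 _ _; simp [deriveF]
  | cons p items ih =>
    intro s0 hnd hs0
    rw [List.foldl_cons]
    have hnd' : (items.map Prod.fst).Nodup := by
      simp only [List.map_cons, List.nodup_cons] at hnd
      exact hnd.2
    have hp1 : p.1 ∉ items.map Prod.fst := by
      simp only [List.map_cons, List.nodup_cons] at hnd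
      exact hnd.1
    by_cases hc : (!p.2.isEmpty && !(PySem.Set.contains ns p.1)) = true
    · rw [if_pos hc]
      have hadd : PySem.Set.add s0 p.1 = s0 ++ [p.1] :=
        PySem.Set.add_of_not_mem (hs0 p (by simp))
      rw [hadd]
      rw [ih (s0 ++ [p.1]) hnd' ?hdisj]
      case hdisj =>
        intro q hq
        simp only [List.mem_append, List.mem_singleton]
        rintro (h | h)
        · exact hs0 q (by simp [hq]) h
        · exact hp1 (h ▸ List.mem_map_of_mem hq)
      unfold deriveF
      rw [List.filter_cons, if_pos hc]
      simp
    · rw [if_neg hc]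
      rw [ih s0 hnd' (fun q hq => hs0 q (by simp [hq]))]
      unfold deriveF
      rw [List.filter_cons, if_neg hc]

-- ===== B-side: characterising the join/sort pipeline =====

def posL (reads : List String) (mink : Int) : List (String × String × Int × Int) :=
  (PySem.List.enumerate reads 0).flatMap (fun rp =>
    (PySem.List.pyRange 1 (PySem.Str.len rp.2) 1).map (fun x =>
      (PySem.Str.slice rp.2 (some x) (some (x + mink)),
       PySem.Str.slice rp.2 (some x) none, rp.1, x)))

def recOf (reads : List String) (targets : List Int) (q : String × String × Int × Int) :
    List (Int × Int × Int × Int) :=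
  ((PySem.List.enumerate targets 0).filter (fun p =>
      PySem.Str.startswith ((PySem.List.pyGet? reads p.2).getD "") q.2.1)).map
    (fun p => (q.2.2.1, q.2.2.2, p.1, p.2))

def canonC (reads : List String) (h_ : List (String × List Int)) (mink : Int) :
    List (Int × Int × Int × Int) :=
  (posL reads mink).flatMap (fun q => recOf reads ((PySem.Dict.mk h_).getD q.1 []) q)

def recKey (t : Int × Int × Int × Int) : List Int := [t.1, t.2.1, t.2.2.1, t.2.2.2]

theorem B_occFold (reads : List String) (mink : Int) :
    ((PySem.List.enumerate reads 0).foldl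
      (fun (d : PySem.Dict String (List (String × Int × Int))) rp =>
        (PySem.List.pyRange 1 (PySem.Str.len rp.2) 1).foldl
          (fun d2 x =>
            d2.modify (PySem.Str.slice rp.2 (some x) (some (x + mink))) []
              (fun l => l ++ [(PySem.Str.slice rp.2 (some x) none, rp.1, x)]))
          d)
      PySem.Dict.empty)
    = (posL reads mink).foldl
        (fun d q => d.modify q.1 [] (fun l => l ++ [q.2])) PySem.Dict.empty := by
  unfold posL
  rw [List.foldl_flatMap]
  apply PySem.List.foldl_congr_mem
  intro d rp _
  rw [List.foldl_map]
theorem filter_beq_flatMap {α β : Type} [BEq α] (key : α) (G : α × β → List (Int × Int × Int × Int)) :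
    ∀ l : List (α × β),
    (l.filter (fun q => q.1 == key)).flatMap G
      = l.flatMap (fun q => if q.1 == key then G q else []) := by
  intro l
  induction l with
  | nil => rfl
  | cons q l ih =>
    rw [List.filter_cons, List.flatMap_cons]
    cases q.1 == key <;> simp [ih]

theorem B_recFold (reads : List String) (h_ : List (String × List Int)) (mink : Int) :
    (h_.foldl
      (fun acc e =>
        ((((posL reads mink).foldl
            (fun (d : PySem.Dict String (List (String × Int × Int))) q =>
              d.modify q.1 [] (fun l => l ++ [q.2])) PySem.Dict.empty)).getD e.1 []).foldl
          (fun acc2 t =>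
            (PySem.List.enumerate e.2 0).foldl
              (fun acc3 p =>
                if PySem.Str.startswith ((PySem.List.pyGet? reads p.2).getD "") t.1 then
                  acc3 ++ [(t.2.1, t.2.2, p.1, p.2)]
                else acc3)
              acc2)
          acc)
      [])
    = h_.flatMap (fun e => (posL reads mink).flatMap
        (fun q => if q.1 == e.1 then recOf reads e.2 q else [])) := by
  have hocc : ∀ e : String × List Int,
      (((posL reads mink).foldl
          (fun (d : PySem.Dict String (List (String × Int × Int))) q =>
            d.modify q.1 [] (fun l => l ++ [q.2])) PySem.Dict.empty)).getD e.1 []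
      = ((posL reads mink).filter (fun q => q.1 == e.1)).map (fun q => q.2) := by
    intro e
    rw [PySem.Dict.getD_foldl_modify_append]
    rfl
  have hmid : ∀ (e : String × List Int) (acc : List (Int × Int × Int × Int)),
      (((((posL reads mink).foldl
          (fun (d : PySem.Dict String (List (String × Int × Int))) q =>
            d.modify q.1 [] (fun l => l ++ [q.2])) PySem.Dict.empty)).getD e.1 []).foldl
        (fun acc2 t =>
          (PySem.List.enumerate e.2 0).foldl
            (fun acc3 p =>
              if PySem.Str.startswith ((PySem.List.pyGet? reads p.2).getD "") t.1 then
                acc3 ++ [(t.2.1, t.2.2, p.1, p.2)]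
              else acc3)
            acc2)
        acc)
      = acc ++ (posL reads mink).flatMap
          (fun q => if q.1 == e.1 then recOf reads e.2 q else []) := by
    intro e acc
    rw [hocc e]
    have h1 := PySem.List.foldl_congr_mem
      (((posL reads mink).filter (fun q => q.1 == e.1)).map (fun q => q.2))
      (fun acc2 t =>
        (PySem.List.enumerate e.2 0).foldl
          (fun acc3 p =>
            if PySem.Str.startswith ((PySem.List.pyGet? reads p.2).getD "") t.1 then
              acc3 ++ [(t.2.1, t.2.2, p.1, p.2)]
            else acc3)
          acc2)
      (fun acc2 t => acc2 ++
        ((PySem.List.enumerate e.2 0).filter (fun p =>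
            PySem.Str.startswith ((PySem.List.pyGet? reads p.2).getD "") t.1)).map
          (fun p => (t.2.1, t.2.2, p.1, p.2)))
      acc
      (fun acc2 t _ => PySem.List.foldl_append_if _ _ _ _)
    refine h1.trans ?_
    rw [PySem.List.foldl_append_eq_flatMap]
    rw [List.flatMap_map, filter_beq_flatMap]
    rfl
  have h2 := PySem.List.foldl_congr_mem h_
    (fun acc e =>
      (((((posL reads mink).foldl
          (fun (d : PySem.Dict String (List (String × Int × Int))) q =>
            d.modify q.1 [] (fun l => l ++ [q.2])) PySem.Dict.empty)).getD e.1 []).foldl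
        (fun acc2 t =>
          (PySem.List.enumerate e.2 0).foldl
            (fun acc3 p =>
              if PySem.Str.startswith ((PySem.List.pyGet? reads p.2).getD "") t.1 then
                acc3 ++ [(t.2.1, t.2.2, p.1, p.2)]
              else acc3)
            acc2)
        acc))
    (fun acc e => acc ++ (posL reads mink).flatMap
      (fun q => if q.1 == e.1 then recOf reads e.2 q else []))
    [] (fun acc e _ => hmid e acc)
  refine h2.trans ?_
  rw [PySem.List.foldl_append_eq_flatMap]
  simp
theorem flatMap_append_perm {β γ : Type} (B : List β) (G H : β → List γ) :
    (B.flatMap fun b => G b ++ H b).Perm (B.flatMap G ++ B.flatMap H) := by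
  induction B with
  | nil => simp
  | cons b B ih =>
    simp only [List.flatMap_cons]
    have p1 : ((G b ++ H b) ++ B.flatMap fun b => G b ++ H b).Perm
        ((G b ++ H b) ++ (B.flatMap G ++ B.flatMap H)) := ih.append_left _
    have hmid : (H b ++ (B.flatMap G ++ B.flatMap H)).Perm
        (B.flatMap G ++ (H b ++ B.flatMap H)) := by
      rw [← List.append_assoc, ← List.append_assoc]
      exact List.Perm.append_right _ List.perm_append_comm
    refine p1.trans ?_
    simp only [List.append_assoc]
    exact List.Perm.append_left _ hmid
theorem flatMap_perm_comm {α β γ : Type} (A : List α) (B : List β) (F : α → β → List γ) :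
    (A.flatMap fun a => B.flatMap fun b => F a b).Perm
      (B.flatMap fun b => A.flatMap fun a => F a b) := by
  induction A with
  | nil => simp
  | cons a A ih =>
    simp only [List.flatMap_cons]
    have p1 : ((B.flatMap fun b => F a b) ++ A.flatMap fun a => B.flatMap fun b => F a b).Perm
        ((B.flatMap fun b => F a b) ++ B.flatMap fun b => A.flatMap fun a => F a b) :=
      ih.append_left _
    exact p1.trans (flatMap_append_perm B _ _).symm
theorem flatMap_ite_key {γ : Type} (h_ : List (String × List Int))
    (hnd : (h_.map Prod.fst).Nodup) (km : String) (G : List Int → List γ) (hG : G [] = []) :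
    h_.flatMap (fun e => if km == e.1 then G e.2 else [])
      = G ((PySem.Dict.mk h_).getD km []) := by
  induction h_ with
  | nil => simpa [PySem.Dict.getD, PySem.Dict.get?] using hG.symm
  | cons e rest ih =>
    simp only [List.map_cons, List.nodup_cons] at hnd
    rw [List.flatMap_cons]
    by_cases hk : (km == e.1) = true
    · have hkm : km = e.1 := by simpa using hk
      have hrest : rest.flatMap (fun e' => if km == e'.1 then G e'.2 else []) = [] := by
        apply List.flatMap_eq_nil_iff.mpr
        intro e' he'
        have : e.1 ≠ e'.1 := by
          intro hcontra
          exact hnd.1 (hcontra ▸ List.mem_map_of_mem he')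
        rw [if_neg (by simp [hkm]; exact fun hh => this hh)]
      rw [if_pos hk, hrest, List.append_nil]
      have : (PySem.Dict.mk (e :: rest)).getD km [] = e.2 := by
        rw [PySem.Dict.getD]
        rw [show (PySem.Dict.mk (e :: rest)) = PySem.Dict.mk ((e.1, e.2) :: rest) by rfl]
        rw [PySem.Dict.get?_mk_cons]
        rw [if_pos (by simpa using hkm.symm)]
        rfl
      rw [this]
    · rw [if_neg hk, List.nil_append, ih hnd.2]
      congr 1
      rw [PySem.Dict.getD, PySem.Dict.getD]
      rw [show (PySem.Dict.mk (e :: rest)) = PySem.Dict.mk ((e.1, e.2) :: rest) by rfl]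
      rw [PySem.Dict.get?_mk_cons]
      rw [if_neg (by intro hh; exact hk (by simpa using (eq_comm.mp (by simpa using hh))))]

theorem B_perm (reads : List String) (h_ : List (String × List Int)) (mink : Int)
    (hnd : (h_.map Prod.fst).Nodup) :
    (h_.flatMap (fun e => (posL reads mink).flatMap
        (fun q => if q.1 == e.1 then recOf reads e.2 q else []))).Perm
      (canonC reads h_ mink) := by
  refine (flatMap_perm_comm h_ (posL reads mink)
      (fun e q => if q.1 == e.1 then recOf reads e.2 q else [])).trans ?_
  apply List.Perm.of_eq
  unfold canonC
  apply List.flatMap_congr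
  intro q _
  exact flatMap_ite_key h_ hnd q.1 (fun l => recOf reads l q) rfl
theorem mem_recOf (reads : List String) (l : List Int) (q : String × String × Int × Int)
    (t : Int × Int × Int × Int) (ht : t ∈ recOf reads l q) :
    t.1 = q.2.2.1 ∧ t.2.1 = q.2.2.2 := by
  unfold recOf at ht
  rcases List.mem_map.mp ht with ⟨p, _, rfl⟩
  exact ⟨rfl, rfl⟩

theorem recKey_lt (t u : Int × Int × Int × Int)
    (h : t.1 < u.1 ∨ (t.1 = u.1 ∧ (t.2.1 < u.2.1 ∨ (t.2.1 = u.2.1 ∧ t.2.2.1 < u.2.2.1)))) :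
    recKey t < recKey u := by
  unfold recKey
  rcases h with h | ⟨h1, h | ⟨h2, h3⟩⟩
  · exact List.Lex.rel h
  · rw [h1]
    exact List.Lex.cons (List.Lex.rel h)
  · rw [h1, h2]
    exact List.Lex.cons (List.Lex.cons (List.Lex.rel h3))

def posLt (q1 q2 : String × String × Int × Int) : Prop :=
  q1.2.2.1 < q2.2.2.1 ∨ (q1.2.2.1 = q2.2.2.1 ∧ q1.2.2.2 < q2.2.2.2)

theorem posL_pairwise (reads : List String) (mink : Int) :
    (posL reads mink).Pairwise posLt := by
  unfold posL
  rw [List.pairwise_flatMap]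
  constructor
  · intro rp _
    rw [List.pairwise_map]
    refine (PySem.List.pairwise_lt_pyRange_one 1 (PySem.Str.len rp.2)).imp ?_
    intro x y hxy
    exact Or.inr ⟨rfl, hxy⟩
  · refine (PySem.List.pairwise_lt_enumerate reads 0).imp ?_
    intro rp1 rp2 h12 t ht u hu
    rcases List.mem_map.mp ht with ⟨x, _, rfl⟩
    rcases List.mem_map.mp hu with ⟨y, _, rfl⟩
    exact Or.inl h12

theorem B_pairwise (reads : List String) (h_ : List (String × List Int)) (mink : Int) :
    (canonC reads h_ mink).Pairwise (fun a b => recKey a < recKey b) := by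
  unfold canonC
  rw [List.pairwise_flatMap]
  constructor
  · intro q _
    unfold recOf
    rw [List.pairwise_map]
    refine ((PySem.List.pairwise_lt_enumerate ((PySem.Dict.mk h_).getD q.1 []) 0).filter _).imp ?_
    intro p1 p2 h
    exact recKey_lt _ _ (Or.inr ⟨rfl, Or.inr ⟨rfl, h⟩⟩)
  · refine (posL_pairwise reads mink).imp ?_
    intro q1 q2 h t ht u hu
    obtain ⟨ht1, ht2⟩ := mem_recOf reads _ q1 t ht
    obtain ⟨hu1, hu2⟩ := mem_recOf reads _ q2 u hu
    rcases h with h | ⟨h1, h2⟩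
    · exact recKey_lt _ _ (Or.inl (by rw [ht1, hu1]; exact h))
    · exact recKey_lt _ _ (Or.inr ⟨by rw [ht1, hu1, h1], Or.inl (by rw [ht2, hu2]; exact h2)⟩)
theorem enum_filter_map {β : Type} (pr : Int → Bool) (g : Int → β) :
    ∀ (l : List Int) (s : Int),
    ((PySem.List.enumerate l s).filter (fun p => pr p.2)).map (fun p => g p.2)
      = (l.filter pr).map g := by
  intro l
  induction l with
  | nil => intro s; rfl
  | cons a l ih =>
    intro s
    rw [PySem.List.enumerate_cons]
    cases h : pr a <;> simp [h, ih]
theorem enum_select {α : Type} (Row : Int × String → List α) :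
    ∀ (xs : List String) (s r : Int), s ≤ r → r < s + xs.length →
    (PySem.List.enumerate xs s).flatMap (fun rp => if rp.1 == r then Row rp else [])
      = Row (r, xs[(r - s).toNat]!) := by
  intro xs
  induction xs with
  | nil =>
    intro s r h1 h2
    simp only [List.length_nil] at h2
    omega
  | cons a xs ih =>
    intro s r h1 h2
    rw [PySem.List.enumerate_cons, List.flatMap_cons]
    by_cases he : s = r
    · subst he
      rw [if_pos (by simp)]
      have htail : (PySem.List.enumerate xs (s + 1)).flatMap
          (fun rp => if rp.1 == s then Row rp else []) = [] := by
        apply List.flatMap_eq_nil_iff.mpr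
        intro rp hrp
        rcases (PySem.List.mem_enumerate_iff _ _ _).mp hrp with ⟨k, hk, rfl⟩
        rw [if_neg (by simp; omega)]
      rw [htail, List.append_nil]
      have : (s - s).toNat = 0 := by omega
      rw [this]
      rfl
    · rw [if_neg (by simp; omega), List.nil_append]
      rw [ih (s + 1) r (by omega) (by simp only [List.length_cons] at h2; omega)]
      have hidx : (r - s).toNat = (r - (s + 1)).toNat + 1 := by omega
      rw [hidx]
      rfl
theorem recOf_filter_r (reads : List String) (l : List Int) (q : String × String × Int × Int)
    (r : Int) :
    (recOf reads l q).filter (fun t => t.1 == r)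
      = if q.2.2.1 == r then recOf reads l q else [] := by
  unfold recOf
  rw [List.filter_map]
  cases h : (q.2.2.1 == r) <;> simp [Function.comp, h]

theorem recOf_proj (reads : List String) (l : List Int) (q : String × String × Int × Int) :
    (recOf reads l q).map (fun t => (t.2.2.2, t.2.1))
      = (l.filter (fun rd =>
            PySem.Str.startswith ((PySem.List.pyGet? reads rd).getD "") q.2.1)).map
          (fun rd => (rd, q.2.2.2)) := by
  unfold recOf
  rw [List.map_map]
  have h := enum_filter_map
    (fun rd => PySem.Str.startswith ((PySem.List.pyGet? reads rd).getD "") q.2.1)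
    (fun rd => ((rd, q.2.2.2) : Int × Int)) l 0
  simpa [Function.comp] using h

theorem recOf_rds (reads : List String) (l : List Int) (q : String × String × Int × Int) :
    (recOf reads l q).map (fun t => t.2.2.2)
      = l.filter (fun rd =>
          PySem.Str.startswith ((PySem.List.pyGet? reads rd).getD "") q.2.1) := by
  unfold recOf
  rw [List.map_map]
  have h := enum_filter_map
    (fun rd => PySem.Str.startswith ((PySem.List.pyGet? reads rd).getD "") q.2.1)
    (fun rd => rd) l 0
  simpa [Function.comp] using h

theorem B_filter_r (reads : List String) (h_ : List (String × List Int)) (mink : Int)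
    (r : Int) (hr0 : 0 ≤ r) (hrn : r < reads.length) :
    (((canonC reads h_ mink).filter (fun t => t.1 == r)).map (fun t => (t.2.2.2, t.2.1)))
      = candED reads h_ mink (PySem.List.pyGetD reads r "") := by
  unfold canonC
  rw [List.filter_flatMap]
  rw [List.flatMap_congr (fun q _ => recOf_filter_r reads ((PySem.Dict.mk h_).getD q.1 []) q r)]
  unfold posL
  rw [List.flatMap_assoc]
  have hrow : ∀ rp : Int × String,
      ((PySem.List.pyRange 1 (PySem.Str.len rp.2) 1).map (fun x =>
          (PySem.Str.slice rp.2 (some x) (some (x + mink)),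
           PySem.Str.slice rp.2 (some x) none, rp.1, x))).flatMap
        (fun q => if q.2.2.1 == r then recOf reads ((PySem.Dict.mk h_).getD q.1 []) q else [])
      = if rp.1 == r then
          ((PySem.List.pyRange 1 (PySem.Str.len rp.2) 1).map (fun x =>
            (PySem.Str.slice rp.2 (some x) (some (x + mink)),
             PySem.Str.slice rp.2 (some x) none, rp.1, x))).flatMap
            (fun q => recOf reads ((PySem.Dict.mk h_).getD q.1 []) q)
        else [] := by
    intro rp
    rw [List.flatMap_map, List.flatMap_map]
    cases h : (rp.1 == r) <;> simp [h]
  rw [List.flatMap_congr (fun rp _ => hrow rp)]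
  rw [enum_select
    (fun rp => ((PySem.List.pyRange 1 (PySem.Str.len rp.2) 1).map (fun x =>
        (PySem.Str.slice rp.2 (some x) (some (x + mink)),
         PySem.Str.slice rp.2 (some x) none, rp.1, x))).flatMap
      (fun q => recOf reads ((PySem.Dict.mk h_).getD q.1 []) q))
    reads 0 r (by omega) (by omega)]
  rw [List.map_flatMap, List.flatMap_map]
  have hread : reads[(r - 0).toNat]! = PySem.List.pyGetD reads r "" := by
    rw [PySem.List.pyGetD_eq_getElem reads "" hr0 hrn]
    rw [show (r - 0).toNat = r.toNat by omega]
    exact getElem!_pos reads r.toNat (by omega)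
  rw [hread]
  unfold candED candX
  apply List.flatMap_congr
  intro x _
  rw [recOf_proj]
  rfl
theorem enum_flatMap_snd {α : Type} (F : String → List α) (xs : List String) (s : Int) :
    (PySem.List.enumerate xs s).flatMap (fun rp => F rp.2) = xs.flatMap F := by
  conv_rhs => rw [← PySem.List.map_snd_enumerate xs s]
  rw [List.flatMap_map]

theorem B_rds (reads : List String) (h_ : List (String × List Int)) (mink : Int) :
    (canonC reads h_ mink).map (fun t => t.2.2.2) = allRds reads h_ mink reads := by
  unfold canonC
  rw [List.map_flatMap]
  rw [List.flatMap_congr (fun q _ => recOf_rds reads ((PySem.Dict.mk h_).getD q.1 []) q)]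
  unfold posL
  rw [List.flatMap_assoc]
  have hrow : ∀ rp : Int × String,
      ((PySem.List.pyRange 1 (PySem.Str.len rp.2) 1).map (fun x =>
          (PySem.Str.slice rp.2 (some x) (some (x + mink)),
           PySem.Str.slice rp.2 (some x) none, rp.1, x))).flatMap
        (fun q => ((PySem.Dict.mk h_).getD q.1 []).filter (fun rd =>
            PySem.Str.startswith ((PySem.List.pyGet? reads rd).getD "") q.2.1))
      = rdsX reads h_ mink rp.2 (PySem.List.pyRange 1 (PySem.Str.len rp.2) 1) := by
    intro rp
    rw [List.flatMap_map]
    rfl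
  rw [List.flatMap_congr (fun rp _ => hrow rp)]
  exact enum_flatMap_snd
    (fun read => rdsX reads h_ mink read (PySem.List.pyRange 1 (PySem.Str.len read) 1)) reads 0
-- ===== VERDICT (by name: the statement is the Claim_ definition above) =====
theorem bulidgraph_spec : Claim_equal_bulidgraph := by
  unfold Claim_equal_bulidgraph
  intro reads h_ mink _ hpre
  unfold Spec_bulidgraph
  have hA : bulidgraph reads h_ mink
      = ((reads.foldl (stepOfn reads h_ mink)
            (PySem.Dict.mk [], 0, deriveF [] [], [])).1.items,
         (reads.foldl (stepOfn reads h_ mink)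
            (PySem.Dict.mk [], 0, deriveF [] [], [])).2.2.1) := rfl
  rw [hA, A_outer reads h_ mink reads [] 0 [] (by simp)]
  simp only [List.nil_append]
  -- B side
  have hinst : (fun (a b : List Int) => a.decidableLT b)
      = (LinearOrder.toDecidableLT : DecidableLT (List Int)) := by
    funext a b
    exact Subsingleton.elim _ _
  have hsrt : @PySem.List.sorted (Int × Int × Int × Int) (List Int) List.instLT
      (fun a b => a.decidableLT b)
      (h_.flatMap (fun e => (posL reads mink).flatMap
        (fun q => if q.1 == e.1 then recOf reads e.2 q else [])))
      (fun t => [t.1, t.2.1, t.2.2.1, t.2.2.2]) false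
      = canonC reads h_ mink := by
    rw [hinst]
    exact PySem.List.sorted_eq_of_perm_of_pairwise_lt _ _ _
      (B_perm reads h_ mink hpre.1).symm (B_pairwise reads h_ mink)
  unfold bulidgraph_alt
  simp only []
  rw [B_occFold reads mink, B_recFold reads h_ mink, hsrt]
  have hg := PySem.Dict.items_foldl_insert_fresh
    (PySem.List.pyRange 0 (PySem.List.len reads) 1) (fun r => r)
    (fun r => ((canonC reads h_ mink).filter (fun t => t.1 == r)).map
      (fun t => (t.2.2.2, t.2.1)))
    PySem.Dict.empty
    (fun a _ => PySem.Dict.contains_empty a)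
    (by simpa using PySem.List.nodup_pyRange_one 0 (PySem.List.len reads))
  have hde : PySem.Dict.empty.items = ([] : List (Int × List (Int × Int))) := rfl
  simp only [hde, List.nil_append] at hg
  rw [hg]
  have hitemsEq : (PySem.List.pyRange 0 (PySem.List.len reads) 1).map
      (fun r => (r, ((canonC reads h_ mink).filter (fun t => t.1 == r)).map
        (fun t => (t.2.2.2, t.2.1))))
      = (PySem.List.enumerate reads 0).map
          (fun p => (p.1, candED reads h_ mink p.2)) := by
    rw [PySem.List.enumerate_eq_map_pyRange reads "", List.map_map]
    apply List.map_congr_left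
    intro r hr
    have hb := PySem.List.mem_pyRange_one.mp hr
    have := B_filter_r reads h_ mink r hb.1 (by simpa using hb.2)
    simp only [Function.comp]
    rw [this]
  rw [hitemsEq]
  have hns : (canonC reads h_ mink).foldl
      (fun s t => PySem.Set.add s t.2.2.2) (PySem.Set.empty : PySem.Set Int)
      = nsAdds [] (allRds reads h_ mink reads) := by
    rw [← B_rds reads h_ mink]
    unfold nsAdds
    rw [List.foldl_map]
    rfl
  rw [hns]
  have hnd : (((PySem.List.enumerate reads 0).map
      (fun p => (p.1, candED reads h_ mink p.2))).map Prod.fst).Nodup := by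
    rw [List.map_map]
    have hcongr : ∀ p ∈ PySem.List.enumerate reads 0,
        (Prod.fst ∘ fun p => (p.1, candED reads h_ mink p.2)) p = (fun p => p.1) p := by
      intro p _
      rfl
    rw [List.map_congr_left hcongr, PySem.List.map_fst_enumerate]
    exact PySem.List.nodup_pyRange_one 0 (0 + (reads.length : Int))
  rw [B_derive _ _ PySem.Set.empty hnd (by simp)]
  simp
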